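-- pv_equiv track=rewrite | github.com/hcl67/Euler | euler160.py | c160
-- ===== SOURCE A (Python) =====
-- def c160(n, d): #计算跳过所有5的倍数及所有偶数/2后的尾数
--     if n > d:
--         kd = n//d
--         kr = n%d
--         rnum, rcnt2 = c160(kr,d)
--         dnum, dcnt2 = c160(d,d)
--         num = 1
--         for i in range(kd):
--             num *= dnum
--             num %= d
--         num *= rnum
--         num %= d
--         cnt2 = dcnt2*kd+rcnt2
--     else:
--         num = 1
--         cnt2 = 0
--         for i in range(2,n+1):
--             if i%5==0:
--                 continue
--             elif i%2 == 0:
--                 num *= i//2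
--                 cnt2 += 1
--             else:
--                 num *= i
--             num %= d
--     return num,cnt2
-- ===== SOURCE B (Python) =====
-- def _tail(m, d):
--     # product over 2..m of (i//2 if i even else i), skipping multiples of 5, mod d;
--     # also counts the halved (even) factors
--     num = 1
--     cnt2 = 0
--     for i in range(2, m + 1):
--         if i % 5 == 0:
--             continue
--         if i % 2 == 0:
--             num = num * (i // 2) % d
--             cnt2 += 1
--         else:
--             num = num * i % d
--     return num, cnt2
--
-- def _powmod(b, e, m):
--     # square-and-multiply: b**e % m for e > 0 (returns 1 when e <= 0)
--     r = 1
--     b = b % m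
--     while e > 0:
--         if e % 2 == 1:
--             r = r * b % m
--         b = b * b % m
--         e = e // 2
--     return r
--
-- def c160(n, d):
--     if n <= d:
--         return _tail(n, d)
--     kd, kr = divmod(n, d)
--     rnum, rcnt2 = _tail(kr, d)
--     dnum, dcnt2 = _tail(d, d)
--     return _powmod(dnum, kd, d) * rnum % d, dcnt2 * kd + rcnt2
-- ===== Notes on version B (the rewrite author's own statement) =====
-- stated objective: alternative
-- what changed: B is non-recursive and replaces A's length-(n//d) modular multiplication loop by square-and-multiply modular exponentiation; the two base products come from one flat helper instead of recursive self-calls (same cost on inputs where the base loop dominates).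
import Mathlib
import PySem

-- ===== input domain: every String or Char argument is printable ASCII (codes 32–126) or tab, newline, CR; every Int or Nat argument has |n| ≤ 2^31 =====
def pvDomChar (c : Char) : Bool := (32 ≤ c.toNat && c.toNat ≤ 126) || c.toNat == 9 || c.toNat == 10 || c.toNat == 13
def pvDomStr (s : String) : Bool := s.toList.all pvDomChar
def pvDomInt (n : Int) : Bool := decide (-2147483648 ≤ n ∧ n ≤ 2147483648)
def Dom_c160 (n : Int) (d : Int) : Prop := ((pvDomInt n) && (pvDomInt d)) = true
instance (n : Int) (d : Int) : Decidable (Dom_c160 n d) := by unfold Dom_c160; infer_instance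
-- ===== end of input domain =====

-- B replaces A's length-(n//d) modular multiply loop by square-and-multiply modular
-- exponentiation and flattens A's recursion into one base-product helper (objective: alternative).

-- ===== PORT A =====
-- A is recursive; inside Pre_ its recursion depth is at most 2, so the port carries a fuel
-- counter (fuel = 2 at the top call) that merely makes the same computation total.
def c160Go : Nat → Int → Int → Int × Int
  | 0, _, _ => (1, 0)      -- fuel exhausted: unreachable inside Pre_c160
  | fuel+1, n, d =>
    if n > d then
      let kd := PySem.Int.floordiv n d
      let kr := PySem.Int.mod n d
      let r := c160Go fuel kr d
      let dd := c160Go fuel d d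
      let num := (PySem.List.pyRange 0 kd 1).foldl (fun num _ => PySem.Int.mod (num * dd.1) d) 1
      (PySem.Int.mod (num * r.1) d, dd.2 * kd + r.2)
    else
      (PySem.List.pyRange 2 (n+1) 1).foldl
        (fun s i =>
          if PySem.Int.mod i 5 == 0 then s
          else if PySem.Int.mod i 2 == 0 then
            (PySem.Int.mod (s.1 * PySem.Int.floordiv i 2) d, s.2 + 1)
          else (PySem.Int.mod (s.1 * i) d, s.2)) (1, 0)

def c160 (n : Int) (d : Int) : List Int :=
  let p := c160Go 2 n d
  [p.1, p.2]

-- ===== PORT B =====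
def tailP (m : Int) (d : Int) : Int × Int :=
  (PySem.List.pyRange 2 (m+1) 1).foldl
    (fun s i =>
      if PySem.Int.mod i 5 == 0 then s
      else if PySem.Int.mod i 2 == 0 then
        (PySem.Int.mod (s.1 * PySem.Int.floordiv i 2) d, s.2 + 1)
      else (PySem.Int.mod (s.1 * i) d, s.2)) (1, 0)

def powGo (r : Int) (b : Int) (e : Int) (m : Int) : Int :=
  if _h : 0 < e then
    powGo (if PySem.Int.mod e 2 == 1 then PySem.Int.mod (r * b) m else r)
          (PySem.Int.mod (b * b) m) (PySem.Int.floordiv e 2) m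
  else r
termination_by e.toNat
decreasing_by
  simp only [PySem.Int.floordiv_eq_ediv_of_pos (by omega : (0:Int) < 2)]
  omega

def powmodP (b : Int) (e : Int) (m : Int) : Int := powGo 1 (PySem.Int.mod b m) e m

def c160_alt (n : Int) (d : Int) : List Int :=
  if n ≤ d then
    let p := tailP n d
    [p.1, p.2]
  else
    let kd := PySem.Int.floordiv n d
    let kr := PySem.Int.mod n d
    let r := tailP kr d
    let dd := tailP d d
    [PySem.Int.mod (powmodP dd.1 kd d * r.1) d, dd.2 * kd + r.2]

-- ===== PRECONDITION & SPEC =====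
-- Pre_ excludes exactly the inputs where the Python A does not return: d = 0 with n > 0
-- (ZeroDivisionError) and d < 0 with n > d (unbounded recursion, RecursionError).
def Pre_c160 (n : Int) (d : Int) : Prop := 0 < d ∨ n ≤ d
instance (n : Int) (d : Int) : Decidable (Pre_c160 n d) := by unfold Pre_c160; infer_instance
def pvWitness_c160 : Int × Int := (10, 3)

def Spec_c160 (n : Int) (d : Int) (out : List Int) : Prop := out = c160_alt n d
instance (n : Int) (d : Int) (out : List Int) : Decidable (Spec_c160 n d out) := by unfold Spec_c160; infer_instance

-- ===== CLAIM (what is proved, stated in full; the proofs are below) =====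
def Claim_equal_c160 : Prop := ∀ (n : Int) (d : Int), Dom_c160 n d → Pre_c160 n d → Spec_c160 n d (c160 n d)

-- ===== LEMMAS AND PROOFS =====

theorem c160Go_base (fuel : Nat) (x d : Int) (h : ¬ x > d) :
    c160Go (fuel+1) x d = tailP x d := by
  simp [c160Go, tailP, h]

-- A's multiply loop computes x^k mod d (as a congruence).
theorem foldA_modeq (d x : Int) (hd : 0 < d) (k : Nat) :
    Int.ModEq d ((List.range k).foldl (fun a _ => PySem.Int.mod (a * x) d) 1) (x ^ k) := by
  induction k with
  | zero => simp [Int.ModEq.refl]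
  | succ k ih =>
    rw [List.range_succ, List.foldl_append]
    simp only [List.foldl_cons, List.foldl_nil, PySem.Int.mod_eq_emod_of_pos hd, pow_succ] at ih ⊢
    exact Int.ModEq.trans (Int.emod_emod_of_dvd _ dvd_rfl) (ih.mul_right x)

-- B's square-and-multiply loop computes r * b^e mod d (as a congruence).
theorem powGo_modeq (d : Int) (hd : 0 < d) (e : Int) (he : 0 ≤ e) (r b : Int) :
    Int.ModEq d (powGo r b e d) (r * b ^ e.toNat) := by
  by_cases hpos : 0 < e
  · rw [powGo, dif_pos hpos]
    simp only [PySem.Int.floordiv_eq_ediv_of_pos (by omega : (0:Int) < 2),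
      PySem.Int.mod_eq_emod_of_pos (by omega : (0:Int) < 2)]
    have h2 : 0 ≤ e / 2 := by omega
    have ih := powGo_modeq d hd (e / 2) h2
      (if (e % 2 == 1) = true then PySem.Int.mod (r * b) d else r)
      (PySem.Int.mod (b * b) d)
    have hb : Int.ModEq d (PySem.Int.mod (b * b) d) (b * b) := by
      rw [PySem.Int.mod_eq_emod_of_pos hd]; exact Int.emod_emod_of_dvd _ dvd_rfl
    have hbm := hb.pow (e / 2).toNat
    by_cases hodd : e % 2 = 1
    · have hr : Int.ModEq d (PySem.Int.mod (r * b) d) (r * b) := by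
        rw [PySem.Int.mod_eq_emod_of_pos hd]; exact Int.emod_emod_of_dvd _ dvd_rfl
      simp only [hodd, beq_self_eq_true, if_true] at ih ⊢
      refine ih.trans ?_
      have hx : (r * b) * (b * b) ^ (e / 2).toNat = r * b ^ e.toNat := by
        have hexp : e.toNat = 2 * (e / 2).toNat + 1 := by omega
        rw [hexp]; ring
      simpa [hx] using (hr.mul hbm)
    · have h0 : e % 2 = 0 := by omega
      have hff : ((e % 2 : Int) == 1) = false := by simp [h0]
      simp only [hff, Bool.false_eq_true, if_false] at ih ⊢
      refine ih.trans ?_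
      have hx : r * (b * b) ^ (e / 2).toNat = r * b ^ e.toNat := by
        have hexp : e.toNat = 2 * (e / 2).toNat := by omega
        rw [hexp]; ring
      simpa [hx] using (Int.ModEq.refl r).mul hbm
  · rw [powGo, dif_neg hpos]
    have h0 : e = 0 := by omega
    subst h0
    simp
termination_by e.toNat
decreasing_by omega

-- one unfolding of A's recursive case
theorem c160Go_rec (fuel : Nat) (n d : Int) (h : n > d) :
    c160Go (fuel+1) n d =
      (PySem.Int.mod (((PySem.List.pyRange 0 (PySem.Int.floordiv n d) 1).foldl
          (fun num _ => PySem.Int.mod (num * (c160Go fuel d d).1) d) 1)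
          * (c160Go fuel (PySem.Int.mod n d) d).1) d,
       (c160Go fuel d d).2 * PySem.Int.floordiv n d + (c160Go fuel (PySem.Int.mod n d) d).2) := by
  simp [c160Go, h]

theorem c160_main : ∀ (n : Int) (d : Int), Pre_c160 n d → c160 n d = c160_alt n d := by
  intro n d hpre
  by_cases h : n ≤ d
  · simp [c160, c160_alt, h, c160Go, tailP, not_lt.mpr h]
  · have hd : 0 < d := by rcases hpre with h1 | h1 <;> omega
    have hn : n > d := lt_of_not_ge h
    have hkr : 0 ≤ PySem.Int.mod n d ∧ PySem.Int.mod n d < d := by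
      rw [PySem.Int.mod_eq_emod_of_pos hd]
      exact ⟨Int.emod_nonneg n (ne_of_gt hd), Int.emod_lt_of_pos n hd⟩
    have hkd : 0 ≤ PySem.Int.floordiv n d := by
      rw [PySem.Int.floordiv_eq_ediv_of_pos hd]
      exact Int.ediv_nonneg (by omega) (by omega)
    have hA1 : c160Go 1 (PySem.Int.mod n d) d = tailP (PySem.Int.mod n d) d :=
      c160Go_base 0 _ d (by omega)
    have hA2 : c160Go 1 d d = tailP d d := c160Go_base 0 d d (by omega)
    simp only [c160, c160_alt, if_neg h]
    rw [show (2:Nat) = 1+1 from rfl, c160Go_rec 1 n d hn, hA1, hA2]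
    simp only [powmodP]
    congr 1
    set kd := PySem.Int.floordiv n d
    set dn := (tailP d d).1
    set r1 := (tailP (PySem.Int.mod n d) d).1
    have hF : Int.ModEq d
        ((PySem.List.pyRange 0 kd 1).foldl (fun num _ => PySem.Int.mod (num * dn) d) 1)
        (dn ^ kd.toNat) := by
      rw [PySem.List.pyRange_one]
      simp only [sub_zero, List.foldl_map]
      exact foldA_modeq d dn hd kd.toNat
    have hP : Int.ModEq d (powGo 1 (PySem.Int.mod dn d) kd d) (dn ^ kd.toNat) := by
      refine (powGo_modeq d hd kd hkd 1 (PySem.Int.mod dn d)).trans ?_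
      have hb : Int.ModEq d (PySem.Int.mod dn d) dn := by
        rw [PySem.Int.mod_eq_emod_of_pos hd]; exact Int.emod_emod_of_dvd _ dvd_rfl
      simpa using (hb.pow kd.toNat).mul_left 1
    have hmain := (hF.trans hP.symm).mul_right r1
    rw [PySem.Int.mod_eq_emod_of_pos hd, PySem.Int.mod_eq_emod_of_pos hd]
    exact hmain

-- ===== VERDICT (by name: the statement is the Claim_ definition above) =====
theorem c160_spec : Claim_equal_c160 := by
  intro n d _ hpre
  exact c160_main n d hpre
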